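-- pv_equiv track=rewrite | github.com/Sagarss2664/PDF_Extraction_Tool | backend/app/services/excel_generator.py | _get_table_headers
-- ===== SOURCE A (Python) =====
-- from typing import Dict, Any, List, Tuple
--
-- def _get_table_headers(data: List[Dict], section: str) -> List[str]:
--     """Get appropriate headers for financial tables"""
--     if not data or not isinstance(data[0], dict):
--         return []
--
--     # Common financial field priorities
--     financial_priority_fields = {
--         'Company_Name': 100, 'Investment_Date': 95, 'Amount': 90, 'Value': 85,
--         'Transaction_Date': 80, 'Investor_Name': 75, 'Currency': 70,
--         'Fund_Name': 65, 'NAV': 60, 'IRR': 55, 'Commitment': 50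
--     }
--
--     all_headers = []
--     for item in data:
--         if isinstance(item, dict):
--             for key in item.keys():
--                 if key not in all_headers:
--                     all_headers.append(key)
--
--     # Sort headers by priority
--     def get_priority(header):
--         return financial_priority_fields.get(header, 0)
--
--     return sorted(all_headers, key=get_priority, reverse=True)
-- ===== SOURCE B (Python) =====
-- # B: drive the output from a fixed descending-priority field list plus a first-seen
-- # key index, instead of sorting the collected headers.
-- _PRIORITY_ORDER = ['Company_Name', 'Investment_Date', 'Amount', 'Value',
--                    'Transaction_Date', 'Investor_Name', 'Currency',
--                    'Fund_Name', 'NAV', 'IRR', 'Commitment']  # distinct priorities, descending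
--
--
-- def _get_table_headers(data, section):
--     seen = dict.fromkeys(k for item in data for k in item)
--     known = set(_PRIORITY_ORDER)
--     head = [f for f in _PRIORITY_ORDER if f in seen]
--     tail = [k for k in seen if k not in known]
--     return head + tail
-- ===== Notes on version B (the rewrite author's own statement) =====
-- stated objective: faster
-- what changed: B replaces A's quadratic `key not in all_headers` list-scan collection plus a stable reverse sort by two pass shapes: dict.fromkeys dedups the keys in one hashed pass, then the fixed descending-priority field list is filtered against that set and the remaining keys are appended in first-seen order; no sort and no linear membership scans.
import Mathlib
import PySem

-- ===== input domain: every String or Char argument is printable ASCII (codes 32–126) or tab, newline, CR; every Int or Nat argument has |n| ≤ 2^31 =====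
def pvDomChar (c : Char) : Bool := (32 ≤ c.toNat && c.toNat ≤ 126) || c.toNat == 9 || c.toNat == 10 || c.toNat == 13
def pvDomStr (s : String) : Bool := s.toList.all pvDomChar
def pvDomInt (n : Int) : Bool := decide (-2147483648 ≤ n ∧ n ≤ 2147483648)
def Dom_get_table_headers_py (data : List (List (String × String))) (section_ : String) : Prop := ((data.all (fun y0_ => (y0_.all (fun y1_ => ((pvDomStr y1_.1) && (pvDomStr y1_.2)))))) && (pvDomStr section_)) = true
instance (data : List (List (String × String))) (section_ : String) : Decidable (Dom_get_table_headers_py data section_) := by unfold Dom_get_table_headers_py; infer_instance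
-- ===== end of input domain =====

-- B collects the distinct keys once and emits a fixed descending-priority field list
-- followed by the remaining keys in first-seen order, instead of sorting (alternative).

-- ===== PORT A =====
-- financial_priority_fields (dict literal)
def pvFPF : PySem.Dict String Int :=
  ⟨[("Company_Name", 100), ("Investment_Date", 95), ("Amount", 90), ("Value", 85),
    ("Transaction_Date", 80), ("Investor_Name", 75), ("Currency", 70),
    ("Fund_Name", 65), ("NAV", 60), ("IRR", 55), ("Commitment", 50)]⟩

-- get_priority(header)
def pvGetPriority (header : String) : Int := PySem.Dict.getD pvFPF header 0

-- In the typed domain every item IS a dict, so the two isinstance checks are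
-- identically true and only the emptiness test of the guard remains.
def get_table_headers_py (data : List (List (String × String))) (section_ : String) : List String :=
  if data = [] then []
  else
    PySem.List.sorted
      (data.foldl (fun acc item =>
        item.foldl (fun acc2 kv => if acc2.contains kv.1 then acc2 else acc2 ++ [kv.1]) acc) [])
      pvGetPriority true

-- ===== PORT B =====
-- _PRIORITY_ORDER (fields with distinct priorities, descending)
def pvPriorityOrder : List String :=
  ["Company_Name", "Investment_Date", "Amount", "Value", "Transaction_Date",
   "Investor_Name", "Currency", "Fund_Name", "NAV", "IRR", "Commitment"]

def get_table_headers_py_alt (data : List (List (String × String))) (section_ : String) : List String :=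
  pvPriorityOrder.filter
      (fun f => (PySem.List.dedup (data.flatMap (fun item => item.map Prod.fst))).contains f)
    ++ (PySem.List.dedup (data.flatMap (fun item => item.map Prod.fst))).filter
      (fun k => !(pvPriorityOrder.contains k))

-- ===== PRECONDITION & SPEC =====
def Spec_get_table_headers_py (data : List (List (String × String))) (section_ : String) (out : List String) : Prop := out = get_table_headers_py_alt data section_
instance (data : List (List (String × String))) (section_ : String) (out : List String) : Decidable (Spec_get_table_headers_py data section_ out) := by unfold Spec_get_table_headers_py; infer_instance

-- ===== CLAIM (what is proved, stated in full; the proofs are below) =====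
def Claim_equal_get_table_headers_py : Prop := ∀ (data : List (List (String × String))) (section_ : String), Dom_get_table_headers_py data section_ → Spec_get_table_headers_py data section_ (get_table_headers_py data section_)

-- ===== LEMMAS AND PROOFS =====

-- every priority is nonnegative
theorem pvPrio_nonneg (h : String) : 0 ≤ pvGetPriority h := by
  unfold pvGetPriority PySem.Dict.getD PySem.Dict.get?
  cases hf : List.find? (fun p => p.1 == h) pvFPF.items with
  | none => simp
  | some p =>
      have hp := List.mem_of_find?_eq_some hf
      simp only [pvFPF, List.mem_cons, List.not_mem_nil, or_false] at hp
      rcases hp with rfl | rfl | rfl | rfl | rfl | rfl | rfl | rfl | rfl | rfl | rfl <;> simp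

-- membership in the priority list is exactly "nonzero priority"
theorem pvPrio_mem_iff (h : String) : h ∈ pvPriorityOrder ↔ pvGetPriority h ≠ 0 := by
  constructor
  · intro hm
    fin_cases hm <;> decide
  · intro hne
    unfold pvGetPriority PySem.Dict.getD PySem.Dict.get? at hne
    cases hf : List.find? (fun p => p.1 == h) pvFPF.items with
    | none => rw [hf] at hne; simp at hne
    | some p =>
        have hph : p.1 = h := by
          have := List.find?_some hf
          simpa using this
        have hp := List.mem_of_find?_eq_some hf
        simp only [pvFPF, List.mem_cons, List.not_mem_nil, or_false] at hp
        rcases hp with rfl | rfl | rfl | rfl | rfl | rfl | rfl | rfl | rfl | rfl | rfl <;>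
          (rw [← hph]; decide)

-- the priority list is strictly decreasing under pvGetPriority
theorem pvPrio_pairwise :
    pvPriorityOrder.Pairwise (fun a b => pvGetPriority b < pvGetPriority a) := by
  decide

-- x goes to the very front when it beats every element
theorem insertBy_all_before {α : Type} (before : α → α → Bool) (x : α) (L : List α)
    (hall : ∀ y ∈ L, before x y = true) :
    PySem.List.insertBy before x L = x :: L := by
  cases L with
  | nil => rfl
  | cons y ys =>
      simp [PySem.List.insertBy, hall y (by simp)]

-- inserting a positive-priority key into (filtered priority list ++ zero tail)
theorem pvInsert_pos (x : String) (ks ts : List String) (c : String → Bool)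
    (hsor : ks.Pairwise (fun a b => pvGetPriority b < pvGetPriority a))
    (hpos : ∀ k ∈ ks, 0 < pvGetPriority k)
    (hx : x ∈ ks)
    (hts : ∀ t ∈ ts, pvGetPriority t = 0)
    (hcx : c x = false) :
    PySem.List.insertBy (fun a b => decide (pvGetPriority b < pvGetPriority a)) x
        (ks.filter c ++ ts)
      = ks.filter (fun f => c f || f == x) ++ ts := by
  induction ks with
  | nil => cases hx
  | cons k ks' ih =>
      rcases List.pairwise_cons.mp hsor with ⟨hk, hsor'⟩
      by_cases hxk : x = k
      · subst hxk
        have hfilt : ks'.filter (fun f => c f || f == x) = ks'.filter c := by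
          apply List.filter_congr
          intro f hf
          have : f ≠ x := by
            intro hfx; subst hfx
            exact absurd (hk f hf) (lt_irrefl _)
          simp [this]
        rw [List.filter_cons, List.filter_cons, if_neg (by simp [hcx]), if_pos (by simp),
          List.cons_append, hfilt]
        apply insertBy_all_before
        intro y hy
        rcases List.mem_append.mp hy with hy | hy
        · have := hk y (List.mem_of_mem_filter hy)
          simpa using this
        · have h0 := hts y hy
          have := hpos x (by simp)
          simp [h0]; omega
      · have hx' : x ∈ ks' := by
          rcases hx with _ | hx
          · exact absurd rfl hxk
          · assumption
        have hkx : pvGetPriority x < pvGetPriority k := hk x hx'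
        have hbk : (decide (pvGetPriority k < pvGetPriority x)) = false := by
          simp; omega
        have hbeq : (k == x) = false := by
          simp [beq_eq_false_iff_ne]
          exact fun h => hxk h.symm
        rw [List.filter_cons, List.filter_cons]
        by_cases hck : c k = true
        · simp only [hck, Bool.true_or, if_true]
          rw [List.cons_append]
          rw [show PySem.List.insertBy (fun a b => decide (pvGetPriority b < pvGetPriority a)) x
                (k :: (ks'.filter c ++ ts))
              = k :: PySem.List.insertBy (fun a b => decide (pvGetPriority b < pvGetPriority a)) x
                (ks'.filter c ++ ts) from by
            simp [PySem.List.insertBy, hbk]]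
          rw [ih hsor' (fun k hk => hpos k (List.mem_cons_of_mem _ hk)) hx']
          rfl
        · have hck' : c k = false := by revert hck; cases c k <;> simp
          rw [if_neg (by simp [hck']), if_neg (by simp [hck', hbeq])]
          exact ih hsor' (fun k hk => hpos k (List.mem_cons_of_mem _ hk)) hx'

-- a zero-priority key goes to the very end
theorem pvInsert_zero (x : String) (L : List String)
    (hx : pvGetPriority x = 0) :
    PySem.List.insertBy (fun a b => decide (pvGetPriority b < pvGetPriority a)) x L
      = L ++ [x] := by
  apply PySem.List.insertBy_of_forall_not_before
  intro y hy
  have := pvPrio_nonneg y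
  simp [hx]; omega

-- characterisation of the stable reverse sort as B's two passes
theorem pvMain (xs : List String) (hnd : xs.Nodup) :
    PySem.List.sorted xs pvGetPriority true
      = pvPriorityOrder.filter (fun f => decide (f ∈ xs))
        ++ xs.filter (fun k => pvGetPriority k == 0) := by
  induction xs using List.reverseRecOn with
  | nil => simp [PySem.List.sorted]
  | append_singleton xs x ih =>
      have hnd' : xs.Nodup := (List.nodup_append.mp hnd).1
      have hxnotin : x ∉ xs := by
        intro hmem
        exact (List.nodup_append.mp hnd).2.2 x hmem x (List.mem_singleton_self x) rfl
      rw [PySem.List.sorted_rev_eq_foldl_insertBy, List.foldl_append]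
      rw [List.foldl_cons, List.foldl_nil, ← PySem.List.sorted_rev_eq_foldl_insertBy, ih hnd']
      by_cases hzx : pvGetPriority x = 0
      · rw [pvInsert_zero x _ hzx]
        have hxK : x ∉ pvPriorityOrder := by
          rw [pvPrio_mem_iff]; simp [hzx]
        have hhead : pvPriorityOrder.filter (fun f => decide (f ∈ xs))
            = pvPriorityOrder.filter (fun f => decide (f ∈ xs ++ [x])) := by
          apply List.filter_congr
          intro f hf
          have : f ≠ x := fun h => hxK (h ▸ hf)
          simp [this]
        rw [List.filter_append, List.append_assoc, hhead]
        simp [hzx]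
      · have hxK : x ∈ pvPriorityOrder := (pvPrio_mem_iff x).mpr hzx
        have hpos : ∀ k ∈ pvPriorityOrder, 0 < pvGetPriority k := by
          intro k hk
          have h1 := pvPrio_nonneg k
          have h2 := (pvPrio_mem_iff k).mp hk
          omega
        rw [pvInsert_pos x pvPriorityOrder (xs.filter (fun k => pvGetPriority k == 0))
            (fun f => decide (f ∈ xs)) pvPrio_pairwise hpos hxK
            (by intro t ht; simpa using (List.of_mem_filter ht))
            (by simp [hxnotin])]
        have hhead : (pvPriorityOrder.filter (fun f => decide (f ∈ xs) || f == x))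
            = pvPriorityOrder.filter (fun f => decide (f ∈ xs ++ [x])) := by
          apply List.filter_congr
          intro f _
          by_cases hfx : f = x <;> simp [hfx, List.mem_append]
        have htail : (xs ++ [x]).filter (fun k => pvGetPriority k == 0)
            = xs.filter (fun k => pvGetPriority k == 0) := by
          rw [List.filter_append]
          simp [hzx]
        rw [hhead, htail]

-- A's nested header-collection loop is the ordered dedup of the flattened key list
theorem pvHeaders_eq (data : List (List (String × String))) (init : List String) :
    data.foldl (fun acc item =>
        item.foldl (fun acc2 kv => if acc2.contains kv.1 then acc2 else acc2 ++ [kv.1]) acc) init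
      = (data.flatMap (fun item => item.map Prod.fst)).foldl PySem.Set.add init := by
  induction data generalizing init with
  | nil => simp
  | cons d ds ih =>
      simp only [List.foldl_cons, List.flatMap_cons, List.foldl_append, List.foldl_map]
      rw [ih]
      rfl

-- B's filters, in membership form
theorem pvAlt_eq (data : List (List (String × String))) (section_ : String) :
    get_table_headers_py_alt data section_
      = pvPriorityOrder.filter
          (fun f => decide (f ∈ PySem.List.dedup (data.flatMap (fun item => item.map Prod.fst))))
        ++ (PySem.List.dedup (data.flatMap (fun item => item.map Prod.fst))).filter
          (fun k => pvGetPriority k == 0) := by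
  unfold get_table_headers_py_alt
  congr 1
  · apply List.filter_congr
    intro f _
    simp
  · apply List.filter_congr
    intro k _
    by_cases hk : k ∈ pvPriorityOrder
    · have := (pvPrio_mem_iff k).mp hk
      simp [hk, this]
    · have : pvGetPriority k = 0 := by
        by_contra hne
        exact hk ((pvPrio_mem_iff k).mpr hne)
      simp [hk, this]

-- ===== VERDICT (by name: the statement is the Claim_ definition above) =====
theorem get_table_headers_py_spec : Claim_equal_get_table_headers_py := by
  intro data section_ _
  unfold Spec_get_table_headers_py
  unfold get_table_headers_py
  by_cases hd : data = []
  · subst hd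
    simp [get_table_headers_py_alt, PySem.List.dedup, PySem.Set.ofList, PySem.Set.empty]
  · rw [if_neg hd]
    have hcollect := pvHeaders_eq data []
    have hset : (data.flatMap (fun item => item.map Prod.fst)).foldl PySem.Set.add []
        = PySem.List.dedup (data.flatMap (fun item => item.map Prod.fst)) := rfl
    have hnodup : (PySem.List.dedup (data.flatMap (fun item => item.map Prod.fst))).Nodup :=
      PySem.Set.nodup_ofList _
    rw [hcollect, hset, pvMain _ hnodup, pvAlt_eq]
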